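-- pv_equiv track=rewrite | github.com/InaeKOO/CRLQAS | environment/VQE_files/VQE_helper.py | num_tqg_he
-- ===== SOURCE A (Python) =====
-- def num_tqg_he(depth, n_qubits):
--     """ Returns number of two qubit gates in Hardware-Efficient Ansatz
--     """
--     ntqg = 0
--     for d in range(depth):
--         for i in range(n_qubits // 2):
--             ntqg += 1
--
--         for i in range(n_qubits // 2 - 1):
--             ntqg += 1
--
--     return ntqg
-- ===== SOURCE B (Python) =====
-- def num_tqg_he(depth, n_qubits):
--     """ Returns number of two qubit gates in Hardware-Efficient Ansatz
--     """
--     half = n_qubits // 2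
--     return max(depth, 0) * (max(half, 0) + max(half - 1, 0))
-- ===== Notes on version B (the rewrite author's own statement) =====
-- stated objective: faster
-- what changed: Replaced the nested per-layer counting loops with a closed-form product max(depth,0)*(max(n//2,0)+max(n//2-1,0)).
import Mathlib
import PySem

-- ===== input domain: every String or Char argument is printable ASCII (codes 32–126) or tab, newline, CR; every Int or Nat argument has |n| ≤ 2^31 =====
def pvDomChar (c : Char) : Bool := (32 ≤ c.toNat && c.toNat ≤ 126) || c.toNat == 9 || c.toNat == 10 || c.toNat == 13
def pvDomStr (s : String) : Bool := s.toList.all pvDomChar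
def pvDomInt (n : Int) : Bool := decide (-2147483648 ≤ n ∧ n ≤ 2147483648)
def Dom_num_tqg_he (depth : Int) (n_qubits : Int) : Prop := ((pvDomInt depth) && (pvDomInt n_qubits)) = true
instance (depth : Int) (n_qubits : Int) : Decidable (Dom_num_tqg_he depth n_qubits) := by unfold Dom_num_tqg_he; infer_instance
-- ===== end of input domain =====

-- B replaces A's nested counting loops by the closed-form product max(depth,0)*(max(n//2,0)+max(n//2-1,0)) (asymptotically faster, O(1)).


-- ===== PORT A =====
-- literal transliteration: two inner counting loops per depth layer
def num_tqg_he (depth : Int) (n_qubits : Int) : Int :=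
  (PySem.List.pyRange 0 depth 1).foldl
    (fun ntqg _ =>
      let ntqg := (PySem.List.pyRange 0 (PySem.Int.floordiv n_qubits 2) 1).foldl
        (fun acc _ => acc + 1) ntqg
      (PySem.List.pyRange 0 (PySem.Int.floordiv n_qubits 2 - 1) 1).foldl
        (fun acc _ => acc + 1) ntqg)
    0

-- ===== PORT B =====
def num_tqg_he_alt (depth : Int) (n_qubits : Int) : Int :=
  let half := PySem.Int.floordiv n_qubits 2
  max depth 0 * (max half 0 + max (half - 1) 0)

-- ===== PRECONDITION & SPEC =====
def Spec_num_tqg_he (depth : Int) (n_qubits : Int) (out : Int) : Prop := out = num_tqg_he_alt depth n_qubits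
instance (depth : Int) (n_qubits : Int) (out : Int) : Decidable (Spec_num_tqg_he depth n_qubits out) := by unfold Spec_num_tqg_he; infer_instance

-- ===== CLAIM (what is proved, stated in full; the proofs are below) =====
def Claim_equal_num_tqg_he : Prop := ∀ (depth : Int) (n_qubits : Int), Dom_num_tqg_he depth n_qubits → Spec_num_tqg_he depth n_qubits (num_tqg_he depth n_qubits)

-- ===== LEMMAS AND PROOFS =====

-- a counting loop over any list adds the list's length
lemma foldl_count (l : List Int) (s : Int) :
    l.foldl (fun acc _ => acc + 1) s = s + l.length := by
  induction l generalizing s with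
  | nil => simp
  | cons x xs ih => simp [List.foldl, ih]; ring

lemma inner_body (n_qubits s : Int) :
    ((PySem.List.pyRange 0 (PySem.Int.floordiv n_qubits 2 - 1) 1).foldl
      (fun acc _ => acc + 1)
      ((PySem.List.pyRange 0 (PySem.Int.floordiv n_qubits 2) 1).foldl
        (fun acc _ => acc + 1) s))
    = s + (max (PySem.Int.floordiv n_qubits 2) 0 + max (PySem.Int.floordiv n_qubits 2 - 1) 0) := by
  rw [foldl_count, foldl_count, PySem.List.length_pyRange_one, PySem.List.length_pyRange_one]
  omega

lemma outer_count (depth c s : Int) :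
    (PySem.List.pyRange 0 depth 1).foldl (fun acc _ => acc + c) s
      = s + max depth 0 * c := by
  rw [PySem.List.pyRange_one]
  have key : ∀ (m : Nat) (s : Int),
      ((List.range m).map (fun k : Nat => (0 : Int) + (k : Int))).foldl (fun acc _ => acc + c) s
        = s + (m : Int) * c := by
    intro m
    induction m with
    | zero => simp
    | succ m ih =>
      intro s
      rw [List.range_succ]
      simp only [List.map_append, List.foldl_append, ih]
      simp only [List.map_cons, List.map_nil, List.foldl_cons, List.foldl_nil]
      push_cast; ring
  rw [key]
  have h : ((depth - 0).toNat : Int) = max depth 0 := by omega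
  rw [h]

theorem num_tqg_he_eq (depth n_qubits : Int) :
    num_tqg_he depth n_qubits = num_tqg_he_alt depth n_qubits := by
  unfold num_tqg_he num_tqg_he_alt
  have hfun :
      (fun ntqg (_ : Int) =>
        let ntqg := (PySem.List.pyRange 0 (PySem.Int.floordiv n_qubits 2) 1).foldl
          (fun acc _ => acc + 1) ntqg
        (PySem.List.pyRange 0 (PySem.Int.floordiv n_qubits 2 - 1) 1).foldl
          (fun acc _ => acc + 1) ntqg)
      = (fun acc (_ : Int) => acc + (max (PySem.Int.floordiv n_qubits 2) 0 + max (PySem.Int.floordiv n_qubits 2 - 1) 0)) := by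
    funext s _
    exact inner_body n_qubits s
  rw [hfun, outer_count]
  ring

-- ===== VERDICT (by name: the statement is the Claim_ definition above) =====
theorem num_tqg_he_spec : Claim_equal_num_tqg_he := by
  intro depth n_qubits _
  unfold Spec_num_tqg_he
  exact num_tqg_he_eq depth n_qubits
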